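-- pv_equiv track=rewrite | github.com/fbm2718/QREM | functions/povmtools.py | register_names_qubits
-- ===== SOURCE A (Python) =====
-- def bit_strings(n, rev=True, form=str):
--     """Generate outcome bitstrings for number_of_qubits-qubits.
--
--     Args:
--         n (int): the number of qubits.
--
--     Returns:
--         list:  list of bitstrings ordered as follows:
--         Example: number_of_qubits=2 returns ['00', '01', '10', '11'].
-- """
--     if (form == str):
--         if (rev == True):
--             return [(bin(j)[2:].zfill(n))[::-1] for j in list(range(2 ** n))]
--         else:
--             return [(bin(j)[2:].zfill(n)) for j in list(range(2 ** n))]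
--     elif (form == list):
--         if (rev == True):
--
--             return [(list(bin(j)[2:].zfill(n))[::-1]) for j in list(range(2 ** n))]
--         else:
--             return [(list(bin(j)[2:].zfill(n))) for j in list(range(2 ** n))]
--
-- def register_names_qubits(qs,
--                           qrs,
--                           rev=False):
--     #TODO: move this function somewhere else
--     if qrs == 0:
--         return ['']
--
--     if (qrs == 1):
--         return ['0', '1']
--
--     all_names = bit_strings(qrs, rev)
--     not_used = []
--
--     for j in list(range(qrs)):
--         if j not in qs:
--             not_used.append(j)
--
--     bad_names = []
--     for name in all_names:
--         for k in (not_used):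
--             rev_name = name[::-1]
--             if (rev_name[k] == '1'):
--                 bad_names.append(name)
--
--     relevant_names = []
--     for name in all_names:
--         if name not in bad_names:
--             relevant_names.append(name)
--
--     return relevant_names
-- ===== SOURCE B (Python) =====
-- def register_names_qubits(qs, qrs, rev=False):
--     if qrs == 0:
--         return ['']
--     if qrs == 1:
--         return ['0', '1']
--     used = [j for j in range(qrs) if j in qs]
--     pos = [qrs - 1 - j for j in reversed(used)] if rev else used
--     out = []
--     for c in range(2 ** len(pos)):
--         v = 0
--         cc = c
--         for p in pos:
--             if cc % 2 == 1:
--                 v += 2 ** p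
--             cc //= 2
--         s = bin(v)[2:].zfill(qrs)
--         out.append(s[::-1] if rev else s)
--     return out
-- ===== Notes on version B (the rewrite author's own statement) =====
-- stated objective: alternative
-- what changed: Instead of generating all 2**qrs bitstrings and filtering them through a bad-names membership scan, B enumerates only the 2**m surviving values directly (m = number of used positions) by spreading the bits of a counter onto the used qubit positions and formatting each value once.
-- outside the precondition, e.g. on register_names_qubits([0], -1, False): A raises TypeError, B returns ['0']
import Mathlib
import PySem

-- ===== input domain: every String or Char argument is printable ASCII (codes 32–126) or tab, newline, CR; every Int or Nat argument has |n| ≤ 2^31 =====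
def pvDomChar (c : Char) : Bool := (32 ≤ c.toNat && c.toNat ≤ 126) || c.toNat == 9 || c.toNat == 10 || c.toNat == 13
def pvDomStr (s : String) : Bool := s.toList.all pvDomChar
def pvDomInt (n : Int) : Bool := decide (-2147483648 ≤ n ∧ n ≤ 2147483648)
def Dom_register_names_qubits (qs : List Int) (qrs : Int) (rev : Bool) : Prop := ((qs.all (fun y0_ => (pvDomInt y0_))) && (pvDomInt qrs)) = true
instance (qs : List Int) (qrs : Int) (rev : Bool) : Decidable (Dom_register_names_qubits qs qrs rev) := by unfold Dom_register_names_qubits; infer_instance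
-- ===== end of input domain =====

-- B replaces A's filter of all 2^qrs bitstrings (with its bad-names membership scan) by direct
-- enumeration of the 2^m surviving values, spreading counter bits onto the used qubit positions.

-- ===== PORT A =====
-- `bin(j)[2:].zfill(n)` for j ≥ 0: PySem.Int.toBinChars j = format(j,'b') = bin(j)[2:]; PySem.Chars.zfill = str.zfill
def pvPad (n : Nat) (j : Nat) : List Char :=
  PySem.Chars.zfill (PySem.Int.toBinChars (j : Int)) (n : Int)

-- port of helper bit_strings(n, rev) with form=str (the only way A calls it)
def pvBitStrings (n : Nat) (rev : Bool) : List String :=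
  if rev then (List.range (2 ^ n)).map (fun j => String.ofList ((pvPad n j).reverse))
  else (List.range (2 ^ n)).map (fun j => String.ofList (pvPad n j))

def register_names_qubits (qs : List Int) (qrs : Int) (rev : Bool) : List String :=
  if qrs == 0 then [""]
  else if qrs == 1 then ["0", "1"]
  else
    let n := qrs.toNat   -- 2**qrs, range(qrs): exact for qrs ≥ 0 (Pre_); Python raises for qrs < 0
    let all_names := pvBitStrings n rev
    -- `for j in list(range(qrs)): if j not in qs: not_used.append(j)`; j kept as Nat, membership tested as Int (exact: range values ≥ 0)
    let not_used := (List.range n).foldl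
      (fun (acc : List Nat) (j : Nat) => if (j : Int) ∈ qs then acc else acc ++ [j]) []
    -- `rev_name = name[::-1]; if rev_name[k] == '1'`: k < qrs = len(name) always holds here, so getD is exact
    let bad_names := all_names.foldl (fun acc name =>
      acc ++ not_used.foldl (fun acc2 k =>
        if (name.toList.reverse).getD k ' ' == '1' then acc2 ++ [name] else acc2) []) []
    all_names.foldl (fun acc name => if name ∈ bad_names then acc else acc ++ [name]) []

-- ===== PORT B =====
def register_names_qubits_alt (qs : List Int) (qrs : Int) (rev : Bool) : List String :=
  if qrs == 0 then [""]
  else if qrs == 1 then ["0", "1"]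
  else
    let n := qrs.toNat
    let used := (List.range n).filter (fun (j : Nat) => decide ((j : Int) ∈ qs))
    let pos := if rev then used.reverse.map (fun j => n - 1 - j) else used
    (List.range (2 ^ pos.length)).map (fun c =>
      let v := (pos.foldl (fun (st : Nat × Nat) p =>
        (st.1 + (if st.2 % 2 = 1 then 2 ^ p else 0), st.2 / 2)) (0, c)).1
      if rev then String.ofList ((pvPad n v).reverse) else String.ofList (pvPad n v))

-- ===== PRECONDITION & SPEC =====
-- Pre_ excludes exactly the inputs where A raises: qrs < 0 (TypeError: range(2**qrs) on a float) and
-- qrs ≥ 63 (OverflowError: list(range(2**qrs)) with 2**qrs beyond ssize_t); A returns on everything else admitted.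
def Pre_register_names_qubits (qs : List Int) (qrs : Int) (rev : Bool) : Prop := 0 ≤ qrs ∧ qrs < 63
instance (qs : List Int) (qrs : Int) (rev : Bool) : Decidable (Pre_register_names_qubits qs qrs rev) := by unfold Pre_register_names_qubits; infer_instance
def pvWitness_register_names_qubits : List Int × Int × Bool := ([0, 2], 3, false)

def Spec_register_names_qubits (qs : List Int) (qrs : Int) (rev : Bool) (out : List String) : Prop := out = register_names_qubits_alt qs qrs rev
instance (qs : List Int) (qrs : Int) (rev : Bool) (out : List String) : Decidable (Spec_register_names_qubits qs qrs rev out) := by unfold Spec_register_names_qubits; infer_instance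

-- ===== CLAIM (what is proved, stated in full; the proofs are below) =====
def Claim_equal_register_names_qubits : Prop := ∀ (qs : List Int) (qrs : Int) (rev : Bool), Dom_register_names_qubits qs qrs rev → Pre_register_names_qubits qs qrs rev → Spec_register_names_qubits qs qrs rev (register_names_qubits qs qrs rev)

-- ===== LEMMAS AND PROOFS =====

def pvBinL (j : Nat) : List Char :=
  if _h : j < 2 then [Nat.digitChar j] else pvBinL (j / 2) ++ [Nat.digitChar (j % 2)]
  decreasing_by omega

lemma pvToDigitsCore_eq (fuel : Nat) : ∀ n ds, n ≤ fuel →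
    Nat.toDigitsCore 2 (fuel + 1) n ds = pvBinL n ++ ds := by
  induction fuel with
  | zero =>
    intro n ds h
    interval_cases n
    simp [Nat.toDigitsCore, pvBinL]
  | succ fuel ih =>
    intro n ds h
    rw [Nat.toDigitsCore]
    by_cases h2 : n / 2 = 0
    · have hn : n < 2 := by omega
      rw [if_pos h2]
      conv_rhs => rw [pvBinL]
      rw [dif_pos hn]
      have : n % 2 = n := by omega
      simp [this]
    · rw [if_neg h2]
      rw [ih (n / 2) _ (by omega)]
      conv_rhs => rw [pvBinL]
      rw [dif_neg (by omega)]
      simp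

lemma pvToBinChars_eq (j : Nat) : PySem.Int.toBinChars (j : Int) = pvBinL j := by
  have h : ¬ ((j : Int) < 0) := by omega
  simp only [PySem.Int.toBinChars, if_neg h, Int.toNat_natCast]
  have := pvToDigitsCore_eq j j [] (le_refl j)
  simpa [Nat.toDigits] using this

lemma pvBinL_digits (j : Nat) : ∀ c ∈ pvBinL j, c = '0' ∨ c = '1' := by
  induction j using pvBinL.induct with
  | case1 j h =>
    rw [pvBinL, dif_pos h]
    interval_cases j <;> simp [Nat.digitChar]
  | case2 j h ih =>
    rw [pvBinL, dif_neg h]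
    intro c hc
    rcases List.mem_append.mp hc with hc | hc
    · exact ih c hc
    · have h2 : j % 2 = 0 ∨ j % 2 = 1 := by omega
      rcases h2 with h2 | h2 <;> simp_all [Nat.digitChar]

lemma pvBinL_ne_nil (j : Nat) : pvBinL j ≠ [] := by
  rw [pvBinL]
  split <;> simp

lemma pvZfill_digits (cs : List Char) (n : Nat) (h : cs ≠ [])
    (hd : ∀ c ∈ cs, c = '0' ∨ c = '1') :
    PySem.Chars.zfill cs (n : Int) = List.replicate (n - cs.length) '0' ++ cs := by
  rw [PySem.Chars.zfill.eq_def]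
  by_cases hle : (n : Int) ≤ (cs.length : Int)
  · rw [if_pos hle]
    have : n - cs.length = 0 := by omega
    simp [this]
  · rw [if_neg hle]
    cases cs with
    | nil => simp at h
    | cons c rest =>
      have hc := hd c (by simp)
      have hne : ¬ (c = '+' ∨ c = '-') := by rcases hc with hc | hc <;> simp [hc]
      simp only [hne, if_false]
      simp

def pvBitChar (j k : Nat) : Char := if j.testBit k then '1' else '0'

lemma pvPad_replicate (n j : Nat) :
    pvPad n j = List.replicate (n - (pvBinL j).length) '0' ++ pvBinL j := by
  rw [pvPad, pvToBinChars_eq, pvZfill_digits _ _ (pvBinL_ne_nil j) (pvBinL_digits j)]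

lemma pvDigitChar_mod (j : Nat) (h : j < 2) : Nat.digitChar j = pvBitChar j 0 := by
  interval_cases j <;> simp [Nat.digitChar, pvBitChar]

lemma pvPad_eq (n : Nat) : ∀ j, 1 ≤ n → j < 2 ^ n →
    pvPad n j = ((List.range n).map (pvBitChar j)).reverse := by
  induction n with
  | zero => omega
  | succ n ih =>
    intro j _ h2
    by_cases hn : n = 0
    · subst hn
      have hj : j < 2 := by simpa using h2
      rw [pvPad_replicate]
      rw [pvBinL, dif_pos hj]
      simp [List.range_succ_eq_map, pvDigitChar_mod j hj]
    · -- n ≥ 1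
      have hstep : pvPad (n+1) j =
          (List.replicate (n - (pvBinL (j/2)).length) '0' ++ pvBinL (j/2)) ++ [Nat.digitChar (j % 2)] := by
        rw [pvPad_replicate]
        by_cases hj : j < 2
        · rw [pvBinL, dif_pos hj]
          have hhalf : j / 2 = 0 := by omega
          rw [hhalf]
          have : pvBinL 0 = ['0'] := by rw [pvBinL]; simp [Nat.digitChar]
          rw [this]
          have hmod : j % 2 = j := by omega
          rw [hmod]
          simp only [List.length_cons, List.length_nil]
          have hrep : List.replicate (n + 1 - 1) '0' = List.replicate (n - 1) '0' ++ ['0'] := by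
            have : n + 1 - 1 = (n - 1) + 1 := by omega
            rw [this, List.replicate_succ']
          rw [hrep]
        · conv_lhs => rw [pvBinL, dif_neg hj]
          rw [List.length_append]
          simp only [List.length_singleton]
          have : n + 1 - ((pvBinL (j / 2)).length + 1) = n - (pvBinL (j / 2)).length := by omega
          rw [this, ← List.append_assoc]
      rw [hstep]
      have hhalf : j / 2 < 2 ^ n := by
        have : 2 ^ (n+1) = 2 ^ n * 2 := by ring
        omega
      rw [← pvPad_replicate, ih (j/2) (by omega) hhalf]
      rw [List.range_succ_eq_map, List.map_cons, List.map_map, List.reverse_cons]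
      congr 1
      · congr 1
        apply List.map_congr_left
        intro k _
        simp only [Function.comp_apply, pvBitChar, Nat.succ_eq_add_one, Nat.testBit_add_one]
      · rw [pvDigitChar_mod (j % 2) (by omega)]
        simp [pvBitChar, Nat.testBit_zero]

lemma pvChar_revFalse (n j k : Nat) (h1 : 1 ≤ n) (h2 : j < 2 ^ n) (hk : k < n) :
    ((pvPad n j).reverse).getD k ' ' = pvBitChar j k := by
  rw [pvPad_eq n j h1 h2, List.reverse_reverse]
  rw [List.getD_eq_getElem _ _ (by simpa using hk)]
  simp

lemma pvChar_revTrue (n j k : Nat) (h1 : 1 ≤ n) (h2 : j < 2 ^ n) (hk : k < n) :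
    (pvPad n j).getD k ' ' = pvBitChar j (n - 1 - k) := by
  rw [pvPad_eq n j h1 h2]
  have hlen : k < ((List.range n).map (pvBitChar j)).reverse.length := by simpa using hk
  rw [List.getD_eq_getElem _ _ hlen, List.getElem_reverse]
  simp

lemma pvBitChar_beq (j t : Nat) : (pvBitChar j t == '1') = j.testBit t := by
  cases h : j.testBit t <;> simp [pvBitChar, h]

def pvSpread : List Nat → Nat → Nat
  | [], _ => 0
  | p :: ps, c => (if c % 2 = 1 then 2 ^ p else 0) + pvSpread ps (c / 2)

lemma pvSpread_foldl (ps : List Nat) : ∀ v c,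
    (ps.foldl (fun (st : Nat × Nat) p =>
      (st.1 + (if st.2 % 2 = 1 then 2 ^ p else 0), st.2 / 2)) (v, c)).1 = v + pvSpread ps c := by
  induction ps with
  | nil => intro v c; simp [pvSpread]
  | cons p ps ih =>
    intro v c
    rw [List.foldl_cons]
    simp only []
    rw [ih]
    simp [pvSpread, Nat.add_assoc]

lemma pvSpread_last_lo (ps : List Nat) (q : Nat) : ∀ c, c < 2 ^ ps.length →
    pvSpread (ps ++ [q]) c = pvSpread ps c := by
  induction ps with
  | nil =>
    intro c hc
    have : c = 0 := by simpa using hc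
    subst this
    simp [pvSpread]
  | cons p ps ih =>
    intro c hc
    simp only [List.cons_append, pvSpread]
    rw [ih (c / 2) (by simp at hc; omega)]

lemma pvSpread_last_hi (ps : List Nat) (q : Nat) : ∀ d, d < 2 ^ ps.length →
    pvSpread (ps ++ [q]) (2 ^ ps.length + d) = 2 ^ q + pvSpread ps d := by
  induction ps with
  | nil =>
    intro d hd
    have : d = 0 := by simpa using hd
    subst this
    simp [pvSpread]
  | cons p ps ih =>
    intro d hd
    simp only [List.cons_append, pvSpread, List.length_cons]
    have h2 : (2:Nat) ^ (ps.length + 1) = 2 * 2 ^ ps.length := by ring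
    have hmod : (2 ^ (ps.length + 1) + d) % 2 = d % 2 := by omega
    have hdiv : (2 ^ (ps.length + 1) + d) / 2 = 2 ^ ps.length + d / 2 := by omega
    rw [hmod, hdiv, ih (d / 2) (by simp at hd; omega)]
    omega

def pvOk (n : Nat) (pos : List Nat) (j : Nat) : Bool :=
  decide (∀ k, k < n → k ∉ pos → j.testBit k = false)

lemma pvLastSplit (pos : List Nat) (n : Nat) (hp : pos.Pairwise (· < ·))
    (hb : ∀ p ∈ pos, p < n + 1) (hn : n ∈ pos) :
    ∃ ps, pos = ps ++ [n] ∧ ps.Pairwise (· < ·) ∧ ∀ p ∈ ps, p < n := by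
  rcases List.eq_nil_or_concat pos with h | ⟨ps, a, h⟩
  · subst h; simp at hn
  · subst h
    simp only [List.concat_eq_append] at hp hb hn ⊢
    rw [List.pairwise_append] at hp
    obtain ⟨hps, -, hlt⟩ := hp
    have ha : a = n := by
      rcases List.mem_append.mp hn with h | h
      · have h1 := hlt n h a (by simp)
        have h2 := hb a (by simp [List.mem_append])
        omega
      · simp at h; omega
    subst ha
    exact ⟨ps, rfl, hps, fun p hp' => hlt p hp' _ (by simp)⟩

lemma pvMain (n : Nat) : ∀ pos : List Nat, pos.Pairwise (· < ·) → (∀ p ∈ pos, p < n) →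
    (List.range (2 ^ n)).filter (pvOk n pos) = (List.range (2 ^ pos.length)).map (pvSpread pos) := by
  induction n with
  | zero =>
    intro pos _ hb
    have hpos : pos = [] := by
      cases pos with
      | nil => rfl
      | cons p ps => exact absurd (hb p (by simp)) (by omega)
    subst hpos
    simp [pvOk, pvSpread]
  | succ n ih =>
    intro pos hp hb
    have hsplit : (2:Nat) ^ (n + 1) = 2 ^ n + 2 ^ n := by ring
    rw [hsplit, List.range_add, List.filter_append, List.filter_map]
    by_cases hn : n ∈ pos
    · obtain ⟨ps, rfl, hps, hpsb⟩ := pvLastSplit pos n hp hb hn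
      -- first half: pvOk (n+1) (ps++[n]) j = pvOk n ps j  for j < 2^n
      have hfil1 : (List.range (2 ^ n)).filter (pvOk (n+1) (ps ++ [n])) =
          (List.range (2 ^ n)).filter (pvOk n ps) := by
        apply List.filter_congr
        intro j hj
        rw [List.mem_range] at hj
        simp only [pvOk, decide_eq_decide]
        constructor
        · intro h k hk hk2
          exact h k (by omega) (by
            simp only [List.mem_append, List.mem_singleton]
            rintro (hm | hm)
            · exact hk2 hm
            · omega)
        · intro h k hk hk2
          simp [List.mem_append] at hk2
          have : k < n := by omega
          exact h k this (by tauto)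
      -- second half
      have hfil2 : (List.range (2 ^ n)).filter (pvOk (n+1) (ps ++ [n]) ∘ (fun i => 2 ^ n + i)) =
          (List.range (2 ^ n)).filter (pvOk n ps) := by
        apply List.filter_congr
        intro i hi
        rw [List.mem_range] at hi
        simp only [Function.comp_apply, pvOk, decide_eq_decide]
        constructor
        · intro h k hk hk2
          have := h k (by omega) (by
            simp only [List.mem_append, List.mem_singleton]
            rintro (hm | hm)
            · exact hk2 hm
            · omega)
          rwa [Nat.testBit_two_pow_add_gt hk] at this
        · intro h k hk hk2
          simp [List.mem_append] at hk2
          have hkn : k < n := by omega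
          rw [Nat.testBit_two_pow_add_gt hkn]
          exact h k hkn (by tauto)
      rw [hfil1, hfil2, ih ps hps hpsb]
      have hlen : (ps ++ [n]).length = ps.length + 1 := by simp
      rw [hlen]
      have hsplit2 : (2:Nat) ^ (ps.length + 1) = 2 ^ ps.length + 2 ^ ps.length := by ring
      rw [hsplit2, List.range_add, List.map_append, List.map_map, List.map_map]
      congr 1
      · apply List.map_congr_left
        intro c hc
        exact (pvSpread_last_lo ps n c (List.mem_range.mp hc)).symm
      · apply List.map_congr_left
        intro d hd
        simp only [Function.comp_apply]
        exact (pvSpread_last_hi ps n d (List.mem_range.mp hd)).symm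
    · -- n ∉ pos: second half dies, first half reduces to width n
      have hb' : ∀ p ∈ pos, p < n := by
        intro p hp'
        have := hb p hp'
        rcases Nat.lt_succ_iff_lt_or_eq.mp this with h | h
        · exact h
        · subst h; exact absurd hp' hn
      have hfil2 : (List.range (2 ^ n)).filter (pvOk (n+1) pos ∘ (fun i => 2 ^ n + i)) = [] := by
        rw [List.filter_eq_nil_iff]
        intro i hi
        simp only [Function.comp_apply, pvOk, decide_eq_true_eq]
        intro h
        have := h n (by omega) hn
        rw [Nat.testBit_two_pow_add_eq] at this
        have hfi : i.testBit n = false := Nat.testBit_lt_two_pow (List.mem_range.mp hi)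
        rw [hfi] at this
        simp at this
      have hfil1 : (List.range (2 ^ n)).filter (pvOk (n+1) pos) =
          (List.range (2 ^ n)).filter (pvOk n pos) := by
        apply List.filter_congr
        intro j hj
        rw [List.mem_range] at hj
        simp only [pvOk, decide_eq_decide]
        constructor
        · intro h k hk hk2
          exact h k (by omega) hk2
        · intro h k hk hk2
          rcases Nat.lt_succ_iff_lt_or_eq.mp hk with h' | h'
          · exact h k h' hk2
          · subst h'
            exact Nat.testBit_lt_two_pow hj
      rw [hfil1, hfil2, ih pos hp hb']
      simp

def pvFmt (n : Nat) (rev : Bool) (j : Nat) : String :=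
  if rev then String.ofList ((pvPad n j).reverse) else String.ofList (pvPad n j)

def pvUsed (qs : List Int) (n : Nat) : List Nat :=
  (List.range n).filter (fun (j : Nat) => decide ((j : Int) ∈ qs))

def pvPos (qs : List Int) (n : Nat) (rev : Bool) : List Nat :=
  if rev then (pvUsed qs n).reverse.map (fun j => n - 1 - j) else pvUsed qs n

lemma pvBitStrings_eq (n : Nat) (rev : Bool) :
    pvBitStrings n rev = (List.range (2 ^ n)).map (pvFmt n rev) := by
  cases rev <;> simp [pvBitStrings, pvFmt]

lemma pvMem_used (qs : List Int) (n : Nat) (k : Nat) :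
    k ∈ pvUsed qs n ↔ k < n ∧ (k : Int) ∈ qs := by
  simp [pvUsed]

lemma pvPos_pairwise (qs : List Int) (n : Nat) (rev : Bool) :
    (pvPos qs n rev).Pairwise (· < ·) := by
  have hu : (pvUsed qs n).Pairwise (· < ·) := List.Pairwise.filter _ List.pairwise_lt_range
  cases rev with
  | false => exact hu
  | true =>
    rw [pvPos]
    simp only [if_true]
    rw [List.pairwise_map, List.pairwise_reverse]
    apply hu.imp_of_mem
    intro a b ha hb hab
    have ha' : a < n := ((pvMem_used qs n a).mp ha).1
    have hb' : b < n := ((pvMem_used qs n b).mp hb).1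
    omega

lemma pvPos_bound (qs : List Int) (n : Nat) (rev : Bool) (hn : 1 ≤ n) :
    ∀ p ∈ pvPos qs n rev, p < n := by
  cases rev with
  | false =>
    intro p hp
    exact ((pvMem_used qs n p).mp hp).1
  | true =>
    intro p hp
    rw [pvPos] at hp
    simp only [if_true, List.mem_map, List.mem_reverse] at hp
    obtain ⟨u, _, rfl⟩ := hp
    omega

lemma pvMem_pos_true (qs : List Int) (n : Nat) (k : Nat) :
    k ∈ pvPos qs n true ↔ ∃ u, (u < n ∧ (u : Int) ∈ qs) ∧ n - 1 - u = k := by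
  rw [pvPos]
  simp only [if_true, List.mem_map, List.mem_reverse]
  constructor
  · rintro ⟨u, hu, rfl⟩
    exact ⟨u, (pvMem_used qs n u).mp hu, rfl⟩
  · rintro ⟨u, hu, rfl⟩
    exact ⟨u, (pvMem_used qs n u).mpr hu, rfl⟩

-- A's per-name bad test, at the bit level

lemma pvCond_eq (n : Nat) (rev : Bool) (j k : Nat) (h1 : 1 ≤ n) (h2 : j < 2 ^ n) (hk : k < n) :
    (((pvFmt n rev j).toList.reverse).getD k ' ' == '1') =
      j.testBit (if rev then n - 1 - k else k) := by
  cases rev with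
  | false =>
    simp only [pvFmt, if_neg (Bool.false_ne_true), String.toList_ofList, if_false]
    rw [pvChar_revFalse n j k h1 h2 hk, pvBitChar_beq]
  | true =>
    simp only [pvFmt, if_true, String.toList_ofList, List.reverse_reverse]
    rw [pvChar_revTrue n j k h1 h2 hk, pvBitChar_beq]

-- the filtering predicate of A equals pvOk

lemma pvBad_iff (qs : List Int) (n : Nat) (rev : Bool) (j : Nat) (h1 : 1 ≤ n) (h2 : j < 2 ^ n) :
    (pvFmt n rev j ∈
      ((List.range (2 ^ n)).map (pvFmt n rev)).flatMap (fun nm =>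
        (((List.range n).filter (fun (k : Nat) => !decide ((k : Int) ∈ qs))).filter
          (fun k => (nm.toList.reverse).getD k ' ' == '1')).map (fun _ => nm))) ↔
      ¬ (∀ k, k < n → k ∉ pvPos qs n rev → j.testBit k = false) := by
  constructor
  · intro h
    obtain ⟨nm, hnm, hx⟩ := List.mem_flatMap.mp h
    obtain ⟨k, hk, hek⟩ := List.mem_map.mp hx
    obtain ⟨hknu, hcond⟩ := List.mem_filter.mp hk
    obtain ⟨hkr, hkq⟩ := List.mem_filter.mp hknu
    have hkn : k < n := List.mem_range.mp hkr
    have hkq' : (k : Int) ∉ qs := by simpa using hkq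
    subst hek
    rw [pvCond_eq n rev j k h1 h2 hkn] at hcond
    intro hall
    cases rev with
    | false =>
      have hknp : k ∉ pvPos qs n false := by
        intro hmem
        exact hkq' ((pvMem_used qs n k).mp hmem).2
      have := hall k hkn hknp
      simp at hcond
      rw [this] at hcond
      exact Bool.false_ne_true hcond
    | true =>
      have hk'n : n - 1 - k < n := by omega
      have hknp : n - 1 - k ∉ pvPos qs n true := by
        intro hmem
        obtain ⟨u, ⟨hun, huq⟩, hequ⟩ := (pvMem_pos_true qs n (n - 1 - k)).mp hmem
        have : u = k := by omega
        subst this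
        exact hkq' huq
      have := hall (n - 1 - k) hk'n hknp
      simp at hcond
      rw [this] at hcond
      exact Bool.false_ne_true hcond
  · intro h
    push_neg at h
    obtain ⟨k', hk'n, hk'p, hbit⟩ := h
    simp only [ne_eq, Bool.not_eq_false] at hbit
    cases rev with
    | false =>
      have hkq : (k' : Int) ∉ qs := by
        intro hq
        exact hk'p ((pvMem_used qs n k').mpr ⟨hk'n, hq⟩)
      refine List.mem_flatMap.mpr ⟨pvFmt n false j, List.mem_map.mpr ⟨j, List.mem_range.mpr h2, rfl⟩, ?_⟩
      refine List.mem_map.mpr ⟨k', List.mem_filter.mpr ⟨List.mem_filter.mpr ⟨List.mem_range.mpr hk'n, by simpa using hkq⟩, ?_⟩, rfl⟩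
      rw [pvCond_eq n false j k' h1 h2 hk'n]
      simpa using hbit
    | true =>
      set k := n - 1 - k' with hkdef
      have hkn : k < n := by omega
      have hkq : (k : Int) ∉ qs := by
        intro hq
        apply hk'p
        refine (pvMem_pos_true qs n k').mpr ⟨k, ⟨hkn, hq⟩, by omega⟩
      refine List.mem_flatMap.mpr ⟨pvFmt n true j, List.mem_map.mpr ⟨j, List.mem_range.mpr h2, rfl⟩, ?_⟩
      refine List.mem_map.mpr ⟨k, List.mem_filter.mpr ⟨List.mem_filter.mpr ⟨List.mem_range.mpr hkn, by simpa using hkq⟩, ?_⟩, rfl⟩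
      rw [pvCond_eq n true j k h1 h2 hkn]
      simp only [if_true]
      have : n - 1 - k = k' := by omega
      rw [this]
      exact hbit

lemma pvPred_eq (qs : List Int) (n : Nat) (rev : Bool) (j : Nat) (h1 : 1 ≤ n) (h2 : j < 2 ^ n) :
    (!decide (pvFmt n rev j ∈
      ((List.range (2 ^ n)).map (pvFmt n rev)).flatMap (fun nm =>
        (((List.range n).filter (fun (k : Nat) => !decide ((k : Int) ∈ qs))).filter
          (fun k => (nm.toList.reverse).getD k ' ' == '1')).map (fun _ => nm)))) =
      pvOk n (pvPos qs n rev) j := by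
  rw [pvOk]
  by_cases hQ : ∀ k, k < n → k ∉ pvPos qs n rev → j.testBit k = false
  · have hP := fun hp => (pvBad_iff qs n rev j h1 h2).mp hp hQ
    rw [decide_eq_false hP, decide_eq_true hQ]
    rfl
  · have hP := (pvBad_iff qs n rev j h1 h2).mpr hQ
    rw [decide_eq_true hP, decide_eq_false hQ]
    rfl

lemma pvFoldl_keep {α : Type} [DecidableEq α] (bad : List α) (l : List α) :
    l.foldl (fun acc x => if x ∈ bad then acc else acc ++ [x]) [] =
      l.filter (fun x => !decide (x ∈ bad)) := by
  have hfun : (fun (acc : List α) x => if x ∈ bad then acc else acc ++ [x]) =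
      (fun (acc : List α) x => if (!decide (x ∈ bad)) = true then acc ++ [id x] else acc) := by
    funext acc x
    by_cases h : x ∈ bad <;> simp [h]
  rw [hfun, PySem.List.foldl_append_if]
  simp

lemma pvA_eval (qs : List Int) (qrs : Int) (rev : Bool) (hq : 2 ≤ qrs) :
    register_names_qubits qs qrs rev =
      ((List.range (2 ^ qrs.toNat)).filter (pvOk qrs.toNat (pvPos qs qrs.toNat rev))).map
        (pvFmt qrs.toNat rev) := by
  have e0 : (qrs == 0) = false := by simp; omega
  have e1 : (qrs == 1) = false := by simp; omega
  set n := qrs.toNat with hndef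
  have hn1 : 1 ≤ n := by omega
  rw [register_names_qubits, e0, e1]
  simp only [Bool.false_eq_true, if_false]
  have hnu : (List.range n).foldl
      (fun (acc : List Nat) (j : Nat) => if (j : Int) ∈ qs then acc else acc ++ [j]) [] =
      (List.range n).filter (fun (k : Nat) => !decide ((k : Int) ∈ qs)) := by
    have hfun : (fun (acc : List Nat) (j : Nat) => if (j : Int) ∈ qs then acc else acc ++ [j]) =
        (fun (acc : List Nat) (j : Nat) =>
          if (!decide ((j : Int) ∈ qs)) = true then acc ++ [id j] else acc) := by
      funext acc j
      by_cases h : (j : Int) ∈ qs <;> simp [h]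
    rw [hfun, PySem.List.foldl_append_if]
    simp
  rw [hnu, pvBitStrings_eq]
  rw [PySem.List.foldl_append_eq_flatMap]
  simp only [List.nil_append, PySem.List.foldl_append_if]
  rw [pvFoldl_keep]
  rw [List.filter_map]
  apply congrArg
  apply List.filter_congr
  intro j hj
  simp only [Function.comp_apply]
  exact pvPred_eq qs n rev j hn1 (List.mem_range.mp hj)

lemma pvB_eval (qs : List Int) (qrs : Int) (rev : Bool) (hq : 2 ≤ qrs) :
    register_names_qubits_alt qs qrs rev =
      (List.range (2 ^ (pvPos qs qrs.toNat rev).length)).map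
        (fun c => pvFmt qrs.toNat rev (pvSpread (pvPos qs qrs.toNat rev) c)) := by
  have e0 : (qrs == 0) = false := by simp; omega
  have e1 : (qrs == 1) = false := by simp; omega
  set n := qrs.toNat with hndef
  rw [register_names_qubits_alt, e0, e1]
  simp only [Bool.false_eq_true, if_false]
  rw [show (if rev then ((List.range n).filter (fun (j : Nat) => decide ((j : Int) ∈ qs))).reverse.map
        (fun j => n - 1 - j) else (List.range n).filter (fun (j : Nat) => decide ((j : Int) ∈ qs))) =
      pvPos qs n rev from by rw [pvPos, pvUsed]]
  apply List.map_congr_left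
  intro c hc
  rw [pvSpread_foldl, Nat.zero_add]
  cases rev <;> simp [pvFmt, hndef]

-- ===== VERDICT (by name: the statement is the Claim_ definition above) =====
theorem register_names_qubits_spec : Claim_equal_register_names_qubits := by
  intro qs qrs rev _ hpre
  unfold Spec_register_names_qubits
  by_cases h0 : qrs = 0
  · simp [register_names_qubits, register_names_qubits_alt, h0]
  by_cases h1 : qrs = 1
  · simp [register_names_qubits, register_names_qubits_alt, h1]
  have hq2 : 2 ≤ qrs := by
    unfold Pre_register_names_qubits at hpre
    omega
  rw [pvA_eval qs qrs rev hq2, pvB_eval qs qrs rev hq2]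
  rw [pvMain qrs.toNat (pvPos qs qrs.toNat rev) (pvPos_pairwise qs qrs.toNat rev)
      (pvPos_bound qs qrs.toNat rev (by omega))]
  simp [List.map_map, Function.comp]
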